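-- pv_equiv track=rewrite | github.com/joshanashakya/dissertation | workspace/dataset/java-python/GeeksForGeeks/5124/A/2.py | smallestIndexsum
-- ===== SOURCE A (Python) =====
-- def smallestIndexsum(arr, n):
--
--     # Starting from the last index
--     i = n - 1;
--
--     # Skip all odd elements and find the
--     # index of the righmost even element
--     while (i >= 0 and arr[i] % 2 == 1):
--         i -= 1;
--
--     # To store the requried sum
--     sum = 0;
--     for j in range(0, i + 1):
--         sum += arr[j];
--
--     return sum;
-- ===== SOURCE B (Python) =====
-- def smallestIndexsum(arr, n):
--     s = 0
--     ans = 0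
--     for j in range(n):
--         s += arr[j]
--         if arr[j] % 2 != 1:
--             ans = s
--     return ans
-- ===== Notes on version B (the rewrite author's own statement) =====
-- stated objective: alternative
-- what changed: Replaces A's backward scan for the rightmost even element followed by a separate forward summation loop with one forward pass that maintains a running prefix sum and captures it whenever the current element is even.
import Mathlib
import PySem

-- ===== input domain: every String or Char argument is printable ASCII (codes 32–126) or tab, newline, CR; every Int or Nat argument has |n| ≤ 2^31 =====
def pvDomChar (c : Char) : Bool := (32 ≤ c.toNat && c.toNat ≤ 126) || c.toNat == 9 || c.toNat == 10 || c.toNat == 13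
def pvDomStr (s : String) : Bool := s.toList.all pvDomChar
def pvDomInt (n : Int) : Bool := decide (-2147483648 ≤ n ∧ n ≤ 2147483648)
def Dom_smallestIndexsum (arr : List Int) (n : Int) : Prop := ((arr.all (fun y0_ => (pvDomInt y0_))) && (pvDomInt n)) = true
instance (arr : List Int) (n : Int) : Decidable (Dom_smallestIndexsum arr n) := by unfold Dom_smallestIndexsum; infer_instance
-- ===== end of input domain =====

-- B replaces A's backward scan for the rightmost even element plus a separate
-- forward summation loop with one forward pass keeping a running prefix sum
-- that is captured whenever the current element is even (alternative, same cost).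


-- ===== PORT A =====
-- the while loop: skip odd elements from index i downwards, return the final i
def smallestIndexsumLoop (arr : List Int) (i : Int) : Int :=
  if h : 0 ≤ i ∧ PySem.Int.mod ((PySem.List.pyGet? arr i).getD 0) 2 = 1 then
    smallestIndexsumLoop arr (i - 1)
  else i
termination_by (i + 1).toNat
decreasing_by omega

def smallestIndexsum (arr : List Int) (n : Int) : Int :=
  let i := smallestIndexsumLoop arr (n - 1)
  (PySem.List.pyRange 0 (i + 1) 1).foldl
    (fun s j => s + (PySem.List.pyGet? arr j).getD 0) 0

-- ===== PORT B =====
def smallestIndexsum_alt (arr : List Int) (n : Int) : Int :=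
  ((PySem.List.pyRange 0 n 1).foldl
    (fun (p : Int × Int) j =>
      let s := p.1 + (PySem.List.pyGet? arr j).getD 0
      (s, if PySem.Int.mod ((PySem.List.pyGet? arr j).getD 0) 2 ≠ 1 then s else p.2))
    (0, 0)).2

-- ===== PRECONDITION & SPEC =====
-- A raises IndexError (at arr[n-1]) exactly when n exceeds len(arr)
def Pre_smallestIndexsum (arr : List Int) (n : Int) : Prop := n ≤ (arr.length : Int)
instance (arr : List Int) (n : Int) : Decidable (Pre_smallestIndexsum arr n) := by
  unfold Pre_smallestIndexsum; infer_instance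

def pvWitness_smallestIndexsum : List Int × Int := ([2, 3, 5], 3)

def Spec_smallestIndexsum (arr : List Int) (n : Int) (out : Int) : Prop := out = smallestIndexsum_alt arr n
instance (arr : List Int) (n : Int) (out : Int) : Decidable (Spec_smallestIndexsum arr n out) := by unfold Spec_smallestIndexsum; infer_instance

-- ===== CLAIM (what is proved, stated in full; the proofs are below) =====
def Claim_equal_smallestIndexsum : Prop := ∀ (arr : List Int) (n : Int), Dom_smallestIndexsum arr n → Pre_smallestIndexsum arr n → Spec_smallestIndexsum arr n (smallestIndexsum arr n)

-- ===== LEMMAS AND PROOFS =====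

-- proof-side abbreviation: A's summation fold over range(0, m)
def pvSum (arr : List Int) (m : Int) : Int :=
  (PySem.List.pyRange 0 m 1).foldl
    (fun s j => s + (PySem.List.pyGet? arr j).getD 0) 0

-- the common answer both programs compute for the first k indices
def pvAns (arr : List Int) : Nat → Int
  | 0 => 0
  | k + 1 =>
      if PySem.Int.mod ((PySem.List.pyGet? arr (k : Int)).getD 0) 2 = 1
      then pvAns arr k else pvSum arr ((k : Int) + 1)

lemma pvSum_succ (arr : List Int) (k : Nat) :
    pvSum arr ((k : Int) + 1) = pvSum arr k + (PySem.List.pyGet? arr (k : Int)).getD 0 := by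
  unfold pvSum
  rw [PySem.List.pyRange_one_succ_right (by exact_mod_cast Nat.zero_le k)]
  simp [List.foldl_append]

lemma loopA_sum (arr : List Int) (k : Nat) :
    pvSum arr (smallestIndexsumLoop arr ((k : Int) - 1) + 1) = pvAns arr k := by
  induction k with
  | zero =>
      rw [smallestIndexsumLoop]
      simp [pvSum, pvAns, PySem.List.pyRange_one_eq_nil]
  | succ k ih =>
      have hk : ((k : Int) + 1) - 1 = (k : Int) := by ring
      rw [show ((k + 1 : Nat) : Int) = (k : Int) + 1 by push_cast; ring, hk,
          smallestIndexsumLoop]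
      by_cases hodd : PySem.Int.mod ((PySem.List.pyGet? arr (k : Int)).getD 0) 2 = 1
      · rw [dif_pos ⟨Int.natCast_nonneg k, hodd⟩]
        rw [show pvAns arr (k + 1) =
          (if PySem.Int.mod ((PySem.List.pyGet? arr (k : Int)).getD 0) 2 = 1
           then pvAns arr k else pvSum arr ((k : Int) + 1)) from rfl, if_pos hodd]
        exact ih
      · rw [dif_neg (by intro h; exact hodd h.2)]
        rw [show pvAns arr (k + 1) =
          (if PySem.Int.mod ((PySem.List.pyGet? arr (k : Int)).getD 0) 2 = 1
           then pvAns arr k else pvSum arr ((k : Int) + 1)) from rfl, if_neg hodd]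

lemma fold_B (arr : List Int) (k : Nat) :
    (PySem.List.pyRange 0 (k : Int) 1).foldl
      (fun (p : Int × Int) j =>
        let s := p.1 + (PySem.List.pyGet? arr j).getD 0
        (s, if PySem.Int.mod ((PySem.List.pyGet? arr j).getD 0) 2 ≠ 1 then s else p.2))
      (0, 0) = (pvSum arr k, pvAns arr k) := by
  induction k with
  | zero => simp [PySem.List.pyRange_one_eq_nil, pvSum, pvAns]
  | succ k ih =>
      rw [show ((k + 1 : Nat) : Int) = (k : Int) + 1 by push_cast; ring,
          PySem.List.pyRange_one_succ_right (by exact_mod_cast Nat.zero_le k),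
          List.foldl_append, ih]
      rw [List.foldl_cons, List.foldl_nil]
      dsimp only
      rw [show pvAns arr (k + 1) =
        (if PySem.Int.mod ((PySem.List.pyGet? arr (k : Int)).getD 0) 2 = 1
         then pvAns arr k else pvSum arr ((k : Int) + 1)) from rfl]
      by_cases hodd : PySem.Int.mod ((PySem.List.pyGet? arr (k : Int)).getD 0) 2 = 1
      · rw [if_pos hodd, if_neg (by simpa using hodd), pvSum_succ]
      · rw [if_neg hodd, if_pos hodd, pvSum_succ]

lemma main_eq (arr : List Int) (n : Int) :
    smallestIndexsum arr n = smallestIndexsum_alt arr n := by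
  by_cases hn : n ≤ 0
  · rw [smallestIndexsum, smallestIndexsumLoop]
    rw [dif_neg (by intro h; omega)]
    unfold smallestIndexsum_alt
    rw [show n - 1 + 1 = n by ring]
    simp [PySem.List.pyRange_one_eq_nil hn]
  · have hk : n = ((n.toNat : Nat) : Int) := by omega
    rw [smallestIndexsum, smallestIndexsum_alt, hk, fold_B]
    exact loopA_sum arr n.toNat

-- ===== VERDICT (by name: the statement is the Claim_ definition above) =====
theorem smallestIndexsum_spec : Claim_equal_smallestIndexsum := by
  intro arr n _ _
  unfold Spec_smallestIndexsum
  exact main_eq arr n
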